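-- pv_equiv track=rewrite | github.com/davityourway/Chaocipher | chaocipher.py | find_starting_position
-- ===== SOURCE A (Python) =====
-- def find_starting_position(plaintext: str, cryptext: str, window_size: int):
--     best_start_index = 0
--     best_start_set_size = 52
--     plaintext_list = [character for character in plaintext]
--     cryptext_list = [character for character in cryptext]
--     for i in range(len(plaintext) - window_size):
--         plaintext_set = set(plaintext_list[i:i + window_size])
--         cryptext_set = set(cryptext_list[i:i + window_size])
--         new_set_size = len(plaintext_set) + len(cryptext_set)
--         if new_set_size < best_start_set_size:
--             best_start_index = i + window_size // 2
--             best_start_set_size = new_set_size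
--     return best_start_index
-- ===== SOURCE B (Python) =====
-- def find_starting_position(plaintext: str, cryptext: str, window_size: int):
--     n = len(plaintext)
--     steps = n - window_size
--     if steps <= 0:
--         return 0
--     w = window_size
--     if w <= 0:
--         # every window is empty: the very first window (size 0) is already minimal
--         return w // 2
--
--     lc = len(cryptext)
--
--     def add(counter, ch):
--         old = counter.get(ch, 0)
--         counter[ch] = old + 1
--         return 1 if old == 0 else 0
--
--     def remove(counter, ch):
--         new = counter.get(ch, 0) - 1
--         counter[ch] = new
--         return 1 if new == 0 else 0
--
--     cp = {}
--     cc = {}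
--     dp = 0
--     dc = 0
--     for j in range(w):
--         dp += add(cp, plaintext[j])
--     for j in range(min(w, lc)):
--         dc += add(cc, cryptext[j])
--
--     best_index = 0
--     best_size = 52
--     for i in range(steps):
--         size = dp + dc
--         if size < best_size:
--             best_size = size
--             best_index = i + w // 2
--         if i + 1 < steps:
--             dp -= remove(cp, plaintext[i])
--             dp += add(cp, plaintext[i + w])
--             if i < lc:
--                 dc -= remove(cc, cryptext[i])
--             if i + w < lc:
--                 dc += add(cc, cryptext[i + w])
--     return best_index
-- ===== Notes on version B (the rewrite author's own statement) =====
-- stated objective: faster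
-- what changed: B replaces A's per-position rebuilding of both window character sets (a set() over each length-w slice at every start index) with a single sliding pass that maintains occurrence counters and distinct counts, updating only at the two window edges.
-- outside the precondition, e.g. on find_starting_position('abca', 'xyz', -2): A returns 1, B returns -1
import Mathlib
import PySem

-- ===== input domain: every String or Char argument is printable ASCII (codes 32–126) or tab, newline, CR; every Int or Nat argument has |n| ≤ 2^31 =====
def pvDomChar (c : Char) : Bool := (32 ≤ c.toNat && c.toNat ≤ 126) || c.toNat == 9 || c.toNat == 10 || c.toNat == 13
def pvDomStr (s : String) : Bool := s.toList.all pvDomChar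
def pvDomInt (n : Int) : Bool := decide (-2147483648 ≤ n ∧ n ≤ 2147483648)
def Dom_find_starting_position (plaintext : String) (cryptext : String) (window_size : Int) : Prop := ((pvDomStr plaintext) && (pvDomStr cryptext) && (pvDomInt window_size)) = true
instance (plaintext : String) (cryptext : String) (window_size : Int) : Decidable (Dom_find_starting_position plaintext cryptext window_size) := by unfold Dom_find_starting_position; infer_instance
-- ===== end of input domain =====

-- B replaces A's per-position rebuilding of both window character sets with one sliding pass
-- maintaining edge-updated occurrence counters and distinct counts (objective: faster).

-- ===== PORT A =====
-- loop body of A's 'for i in range(...)' (state = (best_start_index, best_start_set_size))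
def pvStepA (plaintext_list cryptext_list : List Char) (window_size : Int)
    (st : Int × Int) (i : Int) : Int × Int :=
  let plaintext_set := PySem.Set.ofList (PySem.List.slice plaintext_list (some i) (some (i + window_size)))
  let cryptext_set := PySem.Set.ofList (PySem.List.slice cryptext_list (some i) (some (i + window_size)))
  let new_set_size : Int := (plaintext_set.length : Int) + (cryptext_set.length : Int)
  if new_set_size < st.2 then (i + PySem.Int.floordiv window_size 2, new_set_size) else st

def find_starting_position (plaintext : String) (cryptext : String) (window_size : Int) : Int :=
  let plaintext_list := plaintext.toList
  let cryptext_list := cryptext.toList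
  let res := (PySem.List.pyRange 0 ((plaintext_list.length : Int) - window_size) 1).foldl
    (pvStepA plaintext_list cryptext_list window_size) (0, 52)
  res.1

-- ===== PORT B =====
-- helper 'add(counter, ch)' of Source B: returns (new counter, 1 if ch was absent else 0)
def pvAdd (d : PySem.Dict Char Int) (ch : Char) : PySem.Dict Char Int × Int :=
  let old := d.getD ch 0
  (d.insert ch (old + 1), if old = 0 then 1 else 0)

-- helper 'remove(counter, ch)' of Source B: returns (new counter, 1 if count dropped to 0 else 0)
def pvRem (d : PySem.Dict Char Int) (ch : Char) : PySem.Dict Char Int × Int :=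
  let nw := d.getD ch 0 - 1
  (d.insert ch nw, if nw = 0 then 1 else 0)

-- body of Source B's initialisation loops 'd += add(counter, text[j])'
def pvInitStep (xs : List Char) (s : PySem.Dict Char Int × Int) (j : Int) : PySem.Dict Char Int × Int :=
  let r := pvAdd s.1 (PySem.List.pyGetD xs j ' ')
  (r.1, s.2 + r.2)

-- body of Source B's main loop; state = ((cp, cc, dp, dc), (best_index, best_size))
def pvStepB (pl cl : List Char) (w steps lc : Int)
    (st : (PySem.Dict Char Int × PySem.Dict Char Int × Int × Int) × Int × Int) (i : Int) :
    (PySem.Dict Char Int × PySem.Dict Char Int × Int × Int) × Int × Int :=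
  let cp := st.1.1; let cc := st.1.2.1; let dp := st.1.2.2.1; let dc := st.1.2.2.2
  let size := dp + dc
  let best := if size < st.2.2 then (i + PySem.Int.floordiv w 2, size) else st.2
  if i + 1 < steps then
    let r1 := pvRem cp (PySem.List.pyGetD pl i ' ')
    let a1 := pvAdd r1.1 (PySem.List.pyGetD pl (i + w) ' ')
    let ccdc :=
      if i < lc then
        let r2 := pvRem cc (PySem.List.pyGetD cl i ' ')
        (r2.1, dc - r2.2)
      else (cc, dc)
    let ccdc2 :=
      if i + w < lc then
        let a2 := pvAdd ccdc.1 (PySem.List.pyGetD cl (i + w) ' ')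
        (a2.1, ccdc.2 + a2.2)
      else ccdc
    ((a1.1, ccdc2.1, dp - r1.2 + a1.2, ccdc2.2), best)
  else ((cp, cc, dp, dc), best)

def find_starting_position_alt (plaintext : String) (cryptext : String) (window_size : Int) : Int :=
  let pl := plaintext.toList
  let n : Int := pl.length
  let steps := n - window_size
  if steps ≤ 0 then 0
  else if window_size ≤ 0 then PySem.Int.floordiv window_size 2
  else
    let cl := cryptext.toList
    let lc : Int := cl.length
    let w := window_size
    let s1 := (PySem.List.pyRange 0 w 1).foldl (pvInitStep pl) (PySem.Dict.empty, 0)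
    let s2 := (PySem.List.pyRange 0 (min w lc) 1).foldl (pvInitStep cl) (PySem.Dict.empty, 0)
    let final := (PySem.List.pyRange 0 steps 1).foldl (pvStepB pl cl w steps lc)
      ((s1.1, s2.1, s1.2, s2.2), (0, 52))
    final.2.1

-- ===== PRECONDITION & SPEC =====
-- Pre_ restricts to the natural domain of a window search: 0 ≤ window_size. For negative
-- window_size A reads i+window_size as a Python from-the-end slice bound, producing a
-- meaningless "window"; B does not define windows of negative size.
def Pre_find_starting_position (plaintext : String) (cryptext : String) (window_size : Int) : Prop :=
  0 ≤ window_size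
instance (plaintext : String) (cryptext : String) (window_size : Int) : Decidable (Pre_find_starting_position plaintext cryptext window_size) := by unfold Pre_find_starting_position; infer_instance

def pvWitness_find_starting_position : String × String × Int := ("abcab", "xyzzy", 2)

def Spec_find_starting_position (plaintext : String) (cryptext : String) (window_size : Int) (out : Int) : Prop := out = find_starting_position_alt plaintext cryptext window_size
instance (plaintext : String) (cryptext : String) (window_size : Int) (out : Int) : Decidable (Spec_find_starting_position plaintext cryptext window_size out) := by unfold Spec_find_starting_position; infer_instance

-- ===== CLAIM (what is proved, stated in full; the proofs are below) =====
def Claim_equal_find_starting_position : Prop := ∀ (plaintext : String) (cryptext : String) (window_size : Int), Dom_find_starting_position plaintext cryptext window_size → Pre_find_starting_position plaintext cryptext window_size → Spec_find_starting_position plaintext cryptext window_size (find_starting_position plaintext cryptext window_size)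

-- ===== LEMMAS AND PROOFS =====

-- the window of width W starting at index i
def pvWnd (xs : List Char) (i W : Nat) : List Char := (xs.drop i).take W

-- number of distinct characters
def pvDct (l : List Char) : Int := (l.toFinset.card : Int)

-- counter invariant: d maps every char to its multiplicity in l
def pvInv (d : PySem.Dict Char Int) (l : List Char) : Prop :=
  ∀ ch, d.getD ch 0 = (l.count ch : Int)

lemma pvLenOfList (l : List Char) : ((PySem.Set.ofList l).length : Int) = pvDct l := by
  unfold pvDct
  congr 1
  have hnd : (PySem.Set.ofList l).Nodup := PySem.Set.nodup_ofList l
  have : (PySem.Set.ofList l).toFinset = l.toFinset := by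
    ext x; simp [List.mem_toFinset, PySem.Set.mem_ofList]
  rw [← this, List.toFinset_card_of_nodup hnd]

lemma pvDct_cons (x : Char) (l : List Char) :
    pvDct (x :: l) = pvDct l + (if x ∈ l then 0 else 1) := by
  unfold pvDct
  by_cases h : x ∈ l
  · simp [List.toFinset_cons, Finset.card_insert_of_mem (List.mem_toFinset.2 h), h]
  · simp [List.toFinset_cons, Finset.card_insert_of_notMem (fun hc => h (List.mem_toFinset.1 hc)), h]

lemma pvDct_snoc (l : List Char) (x : Char) :
    pvDct (l ++ [x]) = pvDct l + (if x ∈ l then 0 else 1) := by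
  unfold pvDct
  have : (l ++ [x]).toFinset = insert x l.toFinset := by
    ext y; simp [List.mem_toFinset]
  rw [this]
  by_cases h : x ∈ l
  · simp [h]
  · simp [Finset.card_insert_of_notMem (fun hc => h (List.mem_toFinset.1 hc)), h]

lemma pvAdd_spec (d : PySem.Dict Char Int) (l : List Char) (x : Char) (h : pvInv d l) :
    pvInv (pvAdd d x).1 (l ++ [x]) ∧ (pvAdd d x).2 = (if x ∈ l then 0 else 1) := by
  constructor
  · intro ch
    simp only [pvAdd, PySem.Dict.getD_insert]
    by_cases hc : ch = x
    · subst hc; simp [h ch, List.count_append]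
    · simp [hc, h ch, List.count_append, Ne.symm hc]
  · simp only [pvAdd, h x]
    by_cases hm : x ∈ l
    · have hnz : (l.count x : Int) ≠ 0 := by
        exact_mod_cast fun hz => (List.count_eq_zero.1 hz) hm
      simp [hm]
      exact fun hz => (List.count_eq_zero.1 hz) hm
    · simp [hm, List.count_eq_zero.2 hm]

lemma pvRem_spec (d : PySem.Dict Char Int) (x : Char) (l : List Char) (h : pvInv d (x :: l)) :
    pvInv (pvRem d x).1 l ∧ (pvRem d x).2 = (if x ∈ l then 0 else 1) := by
  constructor
  · intro ch
    simp only [pvRem, PySem.Dict.getD_insert]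
    by_cases hc : ch = x
    · subst hc; simp [h ch, List.count_cons_self]
    · simp [hc, h ch, Ne.symm hc]
  · simp only [pvRem, h x, List.count_cons_self]
    by_cases hm : x ∈ l
    · have : (l.count x : Int) ≠ 0 := by
        exact_mod_cast fun hz => (List.count_eq_zero.1 (by exact_mod_cast hz)) hm
      simp [hm]; omega
    · simp [hm, List.count_eq_zero.2 hm]

-- Source B's initialisation loop over indices equals a fold over the taken prefix
lemma pvIdxFold (xs : List Char) (m : Nat) (hm : m ≤ xs.length) :
    (PySem.List.pyRange 0 (m : Int) 1).foldl (pvInitStep xs) (PySem.Dict.empty, 0)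
      = (xs.take m).foldl (fun s x => let r := pvAdd s.1 x; (r.1, s.2 + r.2)) (PySem.Dict.empty, 0) := by
  induction m with
  | zero => simp
  | succ k ih =>
    have hk : k ≤ xs.length := by omega
    have h1 : ((k : Int) + 1) = ((k + 1 : Nat) : Int) := by push_cast; ring
    rw [← h1, PySem.List.pyRange_one_succ_right (by positivity), List.foldl_append, ih hk,
      List.take_add_one, List.foldl_append]
    have hlt : k < xs.length := by omega
    simp [List.getElem?_eq_getElem hlt, pvInitStep, PySem.List.pyGetD_natCast]

lemma pvAddFold (l l0 : List Char) (d : PySem.Dict Char Int) (s : Int)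
    (hInv : pvInv d l0) (hs : s = pvDct l0) :
    pvInv ((l.foldl (fun s x => let r := pvAdd s.1 x; (r.1, s.2 + r.2)) (d, s)).1) (l0 ++ l) ∧
    (l.foldl (fun s x => let r := pvAdd s.1 x; (r.1, s.2 + r.2)) (d, s)).2 = pvDct (l0 ++ l) := by
  induction l generalizing l0 d s with
  | nil => simpa using ⟨hInv, hs⟩
  | cons x t ih =>
    obtain ⟨h1, h2⟩ := pvAdd_spec d l0 x hInv
    have hs' : s + (pvAdd d x).2 = pvDct (l0 ++ [x]) := by
      rw [h2, hs, pvDct_snoc]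
    simpa [List.append_assoc] using ih (l0 ++ [x]) (pvAdd d x).1 (s + (pvAdd d x).2) h1 hs'

-- window decompositions
lemma pvWnd_cons (xs : List Char) (i W : Nat) (hi : i < xs.length) (hW : 1 ≤ W) :
    pvWnd xs i W = xs[i] :: pvWnd xs (i + 1) (W - 1) := by
  unfold pvWnd
  obtain ⟨W', rfl⟩ : ∃ W', W = W' + 1 := ⟨W - 1, by omega⟩
  rw [List.drop_eq_getElem_cons hi, List.take_succ_cons]
  simp

lemma pvWnd_snoc (xs : List Char) (i W : Nat) (hW : 1 ≤ W) (h : i + W < xs.length) :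
    pvWnd xs (i + 1) W = pvWnd xs (i + 1) (W - 1) ++ [xs[i + W]] := by
  unfold pvWnd
  obtain ⟨W', rfl⟩ : ∃ W', W = W' + 1 := ⟨W - 1, by omega⟩
  rw [List.take_add_one]
  have hlt : W' < (xs.drop (i+1)).length := by simp; omega
  simp [List.getElem?_eq_getElem hlt, List.getElem_drop]
  congr 1
  omega

lemma pvWnd_stop (xs : List Char) (i W : Nat) (hW : 1 ≤ W) (h : xs.length ≤ i + W) :
    pvWnd xs (i + 1) W = pvWnd xs (i + 1) (W - 1) := by
  unfold pvWnd
  rw [List.take_of_length_le (by simp; omega), List.take_of_length_le (by simp; omega)]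

lemma pvWnd_empty (xs : List Char) (i W : Nat) (h : xs.length ≤ i) : pvWnd xs i W = [] := by
  unfold pvWnd
  rw [List.drop_eq_nil_of_le h]
  simp

-- A's per-window set size at a nonnegative start index is the distinct count of the window
lemma pvSliceWnd (xs : List Char) (a w : Int) (ha : 0 ≤ a) (hw : 0 ≤ w) :
    PySem.List.slice xs (some a) (some (a + w)) = pvWnd xs a.toNat w.toNat := by
  have hsl := PySem.List.slice_toNat (xs := xs) (a := a) (b := a + w) ha (by omega)
  rw [hsl]
  unfold pvWnd
  congr 1
  omega

-- main correspondence: from any position a with valid counter state, the two folds agree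
lemma pvMainFold (pl cl : List Char) (w : Int) (hw : 1 ≤ w) (a : Int) (ha : 0 ≤ a)
    (cp cc : PySem.Dict Char Int) (dp dc : Int) (b : Int × Int)
    (hcp : pvInv cp (pvWnd pl a.toNat w.toNat))
    (hdp : dp = pvDct (pvWnd pl a.toNat w.toNat))
    (hcc : pvInv cc (pvWnd cl a.toNat w.toNat))
    (hdc : dc = pvDct (pvWnd cl a.toNat w.toNat)) :
    ((PySem.List.pyRange a ((pl.length : Int) - w) 1).foldl
        (pvStepB pl cl w ((pl.length : Int) - w) (cl.length : Int)) ((cp, cc, dp, dc), b)).2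
      = (PySem.List.pyRange a ((pl.length : Int) - w) 1).foldl (pvStepA pl cl w) b := by
  obtain ⟨W, rfl⟩ : ∃ W : Nat, w = (W : Int) := ⟨w.toNat, (Int.toNat_of_nonneg (by omega)).symm⟩
  have hW : 1 ≤ W := by exact_mod_cast hw
  set steps : Int := (pl.length : Int) - (W : Int) with hsteps
  suffices H : ∀ (k : Nat) (a : Int), 0 ≤ a → (steps - a).toNat ≤ k →
      ∀ (cp cc : PySem.Dict Char Int) (dp dc : Int) (b : Int × Int),
      pvInv cp (pvWnd pl a.toNat W) → dp = pvDct (pvWnd pl a.toNat W) →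
      pvInv cc (pvWnd cl a.toNat W) → dc = pvDct (pvWnd cl a.toNat W) →
      ((PySem.List.pyRange a steps 1).foldl
          (pvStepB pl cl (W : Int) steps (cl.length : Int)) ((cp, cc, dp, dc), b)).2
        = (PySem.List.pyRange a steps 1).foldl (pvStepA pl cl (W : Int)) b by
    exact H (steps - a).toNat a ha le_rfl cp cc dp dc b
      (by simpa using hcp) (by simpa using hdp) (by simpa using hcc) (by simpa using hdc)
  intro k
  induction k with
  | zero =>
    intro a ha hk cp cc dp dc b _ _ _ _
    have : steps ≤ a := by omega
    rw [PySem.List.pyRange_one_eq_nil this]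
    simp
  | succ k ih =>
    intro a ha hk cp cc dp dc b hcp hdp hcc hdc
    by_cases hlt : a < steps
    · obtain ⟨i, rfl⟩ : ∃ i : Nat, a = (i : Int) := ⟨a.toNat, (Int.toNat_of_nonneg ha).symm⟩
      rw [PySem.List.pyRange_one_cons hlt]
      simp only [List.foldl_cons]
      -- the best-state update agrees
      have hsize : ((PySem.Set.ofList (PySem.List.slice pl (some (i : Int)) (some ((i : Int) + (W : Int))))).length : Int)
          + ((PySem.Set.ofList (PySem.List.slice cl (some (i : Int)) (some ((i : Int) + (W : Int))))).length : Int)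
          = dp + dc := by
        rw [pvLenOfList, pvLenOfList, pvSliceWnd pl _ _ (by positivity) (by positivity),
          pvSliceWnd cl _ _ (by positivity) (by positivity), hdp, hdc]
        simp
      have hbestA : pvStepA pl cl (W : Int) b (i : Int)
          = if dp + dc < b.2 then ((i : Int) + PySem.Int.floordiv (W : Int) 2, dp + dc) else b := by
        simp only [pvStepA, hsize]
      -- simplify the toNat casts in hypotheses
      simp only [Int.toNat_natCast] at hcp hdp hcc hdc
      by_cases hlt2 : (i : Int) + 1 < steps
      · -- sliding step
        have hiW : i + W < pl.length := by omega
        have hi : i < pl.length := by omega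
        have hxp : PySem.List.pyGetD pl (i : Int) ' ' = pl[i] := by
          simp [PySem.List.pyGetD_natCast, List.getElem?_eq_getElem hi]
        have hyp : PySem.List.pyGetD pl ((i : Int) + (W : Int)) ' ' = pl[i + W] := by
          have hcast : (i : Int) + (W : Int) = ((i + W : Nat) : Int) := by push_cast; ring
          rw [hcast, PySem.List.pyGetD_natCast]
          simp [List.getD_eq_getElem?_getD, List.getElem?_eq_getElem hiW]
        rw [pvWnd_cons pl i W hi hW] at hcp hdp
        obtain ⟨hr1, hr2⟩ := pvRem_spec cp pl[i] (pvWnd pl (i+1) (W-1)) hcp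
        obtain ⟨ha1, ha2⟩ := pvAdd_spec _ _ pl[i + W] hr1
        rw [← pvWnd_snoc pl i W hW hiW] at ha1
        -- plaintext distinct count
        have hdp' : dp - (pvRem cp pl[i]).2 + (pvAdd (pvRem cp pl[i]).1 pl[i + W]).2
            = pvDct (pvWnd pl (i + 1) W) := by
          rw [hdp, pvDct_cons, hr2, ha2, pvWnd_snoc pl i W hW hiW, pvDct_snoc]
          ring
        have hstep : (steps - ((i : Int) + 1)).toNat ≤ k := by omega
        have hcast1 : (i : Int) + 1 = ((i + 1 : Nat) : Int) := by push_cast; ring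
        -- unfold B's step
        simp only [pvStepB, hxp, hyp]
        rw [if_pos hlt2, ← hbestA]
        by_cases hc1 : (i : Int) < (cl.length : Int)
        · have hic : i < cl.length := by exact_mod_cast hc1
          have hxc : PySem.List.pyGetD cl (i : Int) ' ' = cl[i] := by
            simp [PySem.List.pyGetD_natCast, List.getElem?_eq_getElem hic]
          rw [pvWnd_cons cl i W hic hW] at hcc hdc
          obtain ⟨hs1, hs2⟩ := pvRem_spec cc cl[i] (pvWnd cl (i+1) (W-1)) hcc
          have hdc' : dc - (pvRem cc cl[i]).2 = pvDct (pvWnd cl (i + 1) (W - 1)) := by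
            rw [hdc, pvDct_cons, hs2]; ring
          rw [if_pos hc1]
          simp only [hxc]
          by_cases hc2 : (i : Int) + (W : Int) < (cl.length : Int)
          · have hicW : i + W < cl.length := by exact_mod_cast hc2
            have hyc : PySem.List.pyGetD cl ((i : Int) + (W : Int)) ' ' = cl[i + W] := by
              have hcast : (i : Int) + (W : Int) = ((i + W : Nat) : Int) := by push_cast; ring
              rw [hcast, PySem.List.pyGetD_natCast]
              simp [List.getD_eq_getElem?_getD, List.getElem?_eq_getElem hicW]
            rw [if_pos hc2]
            simp only [hyc]
            obtain ⟨hs3, hs4⟩ := pvAdd_spec _ _ cl[i + W] hs1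
            rw [← pvWnd_snoc cl i W hW hicW] at hs3
            have hdc'' : dc - (pvRem cc cl[i]).2 + (pvAdd (pvRem cc cl[i]).1 cl[i + W]).2
                = pvDct (pvWnd cl (i + 1) W) := by
              rw [hdc', hs4, pvWnd_snoc cl i W hW hicW, pvDct_snoc]
            rw [hcast1]
            exact ih ((i + 1 : Nat) : Int) (by positivity) (by omega) _ _ _ _ _
              (by simpa using ha1) (by simpa using hdp') (by simpa using hs3) (by simpa using hdc'')
          · rw [if_neg hc2]
            have hwstop : pvWnd cl (i + 1) W = pvWnd cl (i + 1) (W - 1) :=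
              pvWnd_stop cl i W hW (by omega)
            rw [hcast1]
            exact ih ((i + 1 : Nat) : Int) (by positivity) (by omega) _ _ _ _ _
              (by simpa using ha1) (by simpa using hdp')
              (by simpa [hwstop] using hs1) (by simpa [hwstop] using hdc')
        · have hc2 : ¬ ((i : Int) + (W : Int) < (cl.length : Int)) := by omega
          rw [if_neg hc1, if_neg hc2]
          have hemp : pvWnd cl i W = [] := pvWnd_empty cl i W (by omega)
          have hemp' : pvWnd cl (i + 1) W = [] := pvWnd_empty cl (i + 1) W (by omega)
          rw [hemp] at hcc hdc
          rw [hcast1]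
          exact ih ((i + 1 : Nat) : Int) (by positivity) (by omega) _ _ _ _ _
            (by simpa using ha1) (by simpa using hdp')
            (by simpa [hemp'] using hcc) (by simpa [hemp'] using hdc)
      · -- last iteration: range (a+1) steps is empty
        have hnil : PySem.List.pyRange ((i : Int) + 1) steps 1 = [] :=
          PySem.List.pyRange_one_eq_nil (by omega)
        rw [hnil]
        simp only [List.foldl_nil]
        simp only [pvStepB]
        rw [if_neg hlt2, hbestA]
    · rw [PySem.List.pyRange_one_eq_nil (by omega)]
      simp

-- a slice from a to a is empty
lemma pvSliceSelf (xs : List Char) (a : Int) (ha : 0 ≤ a) :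
    PySem.List.slice xs (some a) (some a) = [] := by
  have h := PySem.List.slice_toNat (xs := xs) (a := a) (b := a) ha ha
  rw [h]
  simp

-- the w = 0 tail: every window is empty, the state (x, 0) is never improved on
lemma pvZeroFold (pl cl : List Char) (a : Int) (ha : 0 ≤ a) (m : Int) (x : Int) :
    (PySem.List.pyRange a m 1).foldl (pvStepA pl cl 0) (x, 0) = (x, 0) := by
  suffices H : ∀ (k : Nat) (a : Int), 0 ≤ a → (m - a).toNat ≤ k →
      (PySem.List.pyRange a m 1).foldl (pvStepA pl cl 0) (x, 0) = (x, 0) from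
    H (m - a).toNat a ha le_rfl
  intro k
  induction k with
  | zero =>
    intro a ha hk
    rw [PySem.List.pyRange_one_eq_nil (by omega)]
    simp
  | succ k ih =>
    intro a ha hk
    by_cases hlt : a < m
    · rw [PySem.List.pyRange_one_cons hlt]
      simp only [List.foldl_cons]
      have hstep : pvStepA pl cl 0 (x, 0) a = (x, 0) := by
        simp [pvStepA, pvSliceSelf pl a ha, pvSliceSelf cl a ha]
      rw [hstep]
      exact ih (a + 1) (by omega) (by omega)
    · rw [PySem.List.pyRange_one_eq_nil (by omega)]
      simp

-- ===== VERDICT (by name: the statement is the Claim_ definition above) =====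
theorem find_starting_position_spec : Claim_equal_find_starting_position := by
  intro p c w hdom hpre
  unfold Spec_find_starting_position Pre_find_starting_position at *
  simp only [find_starting_position, find_starting_position_alt]
  by_cases h1 : (p.toList.length : Int) - w ≤ 0
  · rw [if_pos h1, PySem.List.pyRange_one_eq_nil (by omega)]
    simp
  · rw [if_neg h1]
    by_cases h2 : w ≤ 0
    · rw [if_pos h2]
      have hw0 : w = 0 := le_antisymm h2 hpre
      subst hw0
      rw [PySem.List.pyRange_one_cons (by omega)]
      simp only [List.foldl_cons]
      have hstep : pvStepA p.toList c.toList 0 (0, 52) 0 = (PySem.Int.floordiv 0 2, 0) := by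
        simp [pvStepA, pvSliceSelf p.toList 0 le_rfl, pvSliceSelf c.toList 0 le_rfl]
      rw [hstep, pvZeroFold p.toList c.toList (0 + 1) (by omega) _ _]
    · rw [if_neg h2]
      obtain ⟨W, rfl⟩ : ∃ W : Nat, w = (W : Int) := ⟨w.toNat, (Int.toNat_of_nonneg hpre).symm⟩
      have hW : 1 ≤ W := by exact_mod_cast (by omega : (1 : Int) ≤ (W : Int))
      have hWle : W ≤ p.toList.length := by omega
      have hmin : min ((W : Nat) : Int) ((c.toList.length : Nat) : Int)
          = ((min W c.toList.length : Nat) : Int) := by push_cast; rfl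
      rw [pvIdxFold p.toList W hWle, hmin, pvIdxFold c.toList _ (min_le_right _ _)]
      have hinvE : pvInv PySem.Dict.empty [] := by
        intro ch; simp [PySem.Dict.getD_empty]
      obtain ⟨hp1, hp2⟩ := pvAddFold (p.toList.take W) [] PySem.Dict.empty 0 hinvE (by simp [pvDct])
      obtain ⟨hq1, hq2⟩ := pvAddFold (c.toList.take (min W c.toList.length)) [] PySem.Dict.empty 0 hinvE (by simp [pvDct])
      have htakec : c.toList.take (min W c.toList.length) = c.toList.take W := by
        rcases le_total W c.toList.length with h | h
        · rw [min_eq_left h]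
        · rw [min_eq_right h, List.take_of_length_le h, List.take_of_length_le le_rfl]
      rw [htakec] at hq1 hq2
      rw [htakec]
      have hw0p : pvWnd p.toList 0 W = p.toList.take W := by simp [pvWnd]
      have hw0c : pvWnd c.toList 0 W = c.toList.take W := by simp [pvWnd]
      have hmain := pvMainFold p.toList c.toList (W : Int) (by exact_mod_cast hW) 0 le_rfl
        _ _ _ _ (0, 52)
        (by simpa [hw0p] using hp1) (by simpa [hw0p] using hp2)
        (by simpa [hw0c] using hq1) (by simpa [hw0c] using hq2)
      exact (congrArg Prod.fst hmain).symm
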